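-- pv_equiv track=rewrite | github.com/ChunqiGuo02/NeXus | mcp-servers/pipeline-orchestrator/venue_tier_registry.py | get_tier_for_venue
-- ===== SOURCE A (Python) =====
-- DEFAULT_TIERS: dict[str, dict[str, list[str]]] = {
--     "ai_ml": {
--         "tier_1": ["NeurIPS", "ICML", "ICLR"],
--         "tier_2": ["AAAI", "IJCAI", "AISTATS", "UAI", "CoLT"],
--         "tier_3": ["ACML", "ECML-PKDD", "AutoML Conf"],
--     },
--     "cv": {
--         "tier_1": ["CVPR", "ICCV"],
--         "tier_2": ["ECCV", "ACM MM"],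
--         "tier_3": ["WACV", "BMVC", "ICIP", "ICPR"],
--     },
--     "nlp": {
--         "tier_1": ["ACL"],
--         "tier_2": ["EMNLP", "Findings of ACL/EMNLP"],
--         "tier_3": ["NAACL", "COLING", "EACL", "AACL", "LREC"],
--     },
--     "robotics": {
--         "tier_1": ["RSS", "CoRL"],
--         "tier_2": ["ICRA", "IROS"],
--         "tier_3": ["Humanoids", "ISER", "RoboSoft"],
--     },
--     "data_mining": {
--         "tier_1": ["KDD", "WWW", "SIGIR", "WSDM"],
--         "tier_2": ["CIKM", "ICDM", "SDM", "ECIR"],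
--         "tier_3": ["PAKDD", "DASFAA", "WISE"],
--     },
--     "journals": {
--         "tier_1": ["TPAMI", "IJCV", "JMLR", "TACL", "Nature MI"],
--         "tier_2": ["TIP", "TNNLS", "PR", "TMM", "TKDE"],
--         "tier_3": ["Neurocomputing", "NCAA", "ESWA"],
--     },
-- }
--
-- def get_tier_for_venue(
--     venue_name: str,
--     field: str = "auto",
--     user_overrides: dict | None = None,
-- ) -> int | None:
--     """返回 venue 的 tier（1/2/3），未知 venue 返回 None。
--
--     Parameters
--     ----------
--     venue_name : str
--         会议/期刊名称。
--     field : str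
--         领域名称，"auto" 表示自动检测。
--     user_overrides : dict | None
--         用户自定义的 tier 覆盖。
--
--     Returns
--     -------
--     int | None
--         1, 2, 3 或 None（未知 venue）。
--     """
--     tiers = _merge_tiers(user_overrides)
--     venue_lower = venue_name.lower().strip()
--
--     fields_to_search = (
--         list(tiers.keys()) if field == "auto" else [field]
--     )
--
--     for f in fields_to_search:
--         field_tiers = tiers.get(f, {})
--         for tier_name, venues in field_tiers.items():
--             for v in venues:
--                 if v.lower() == venue_lower:
--                     return int(tier_name.split("_")[1])
--
--     return None
--
-- def _merge_tiers(user_overrides: dict | None) -> dict: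
--     """合并默认 tiers 和用户覆盖。"""
--     import copy
--
--     result = copy.deepcopy(DEFAULT_TIERS)
--     if not user_overrides:
--         return result
--
--     for field, field_tiers in user_overrides.items():
--         if field not in result:
--             result[field] = {}
--         for tier_name, venues in field_tiers.items():
--             if tier_name in result[field]:
--                 # 追加去重
--                 existing = {v.lower() for v in result[field][tier_name]}
--                 for v in venues:
--                     if v.lower() not in existing:
--                         result[field][tier_name].append(v)
--             else:
--                 result[field][tier_name] = venues
--
--     return result
-- ===== SOURCE B (Python) =====
-- DEFAULT_TIERS: dict[str, dict[str, list[str]]] = {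
--     "ai_ml": {
--         "tier_1": ["NeurIPS", "ICML", "ICLR"],
--         "tier_2": ["AAAI", "IJCAI", "AISTATS", "UAI", "CoLT"],
--         "tier_3": ["ACML", "ECML-PKDD", "AutoML Conf"],
--     },
--     "cv": {
--         "tier_1": ["CVPR", "ICCV"],
--         "tier_2": ["ECCV", "ACM MM"],
--         "tier_3": ["WACV", "BMVC", "ICIP", "ICPR"],
--     },
--     "nlp": {
--         "tier_1": ["ACL"],
--         "tier_2": ["EMNLP", "Findings of ACL/EMNLP"],
--         "tier_3": ["NAACL", "COLING", "EACL", "AACL", "LREC"],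
--     },
--     "robotics": {
--         "tier_1": ["RSS", "CoRL"],
--         "tier_2": ["ICRA", "IROS"],
--         "tier_3": ["Humanoids", "ISER", "RoboSoft"],
--     },
--     "data_mining": {
--         "tier_1": ["KDD", "WWW", "SIGIR", "WSDM"],
--         "tier_2": ["CIKM", "ICDM", "SDM", "ECIR"],
--         "tier_3": ["PAKDD", "DASFAA", "WISE"],
--     },
--     "journals": {
--         "tier_1": ["TPAMI", "IJCV", "JMLR", "TACL", "Nature MI"],
--         "tier_2": ["TIP", "TNNLS", "PR", "TMM", "TKDE"],
--         "tier_3": ["Neurocomputing", "NCAA", "ESWA"],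
--     },
-- }
--
--
-- def get_tier_for_venue(
--     venue_name: str,
--     field: str = "auto",
--     user_overrides: dict | None = None,
-- ) -> int | None:
--     """Direct scan over defaults + overrides, without building a merged registry."""
--     venue_lower = venue_name.lower().strip()
--     overrides = user_overrides or {}
--
--     if field == "auto":
--         field_order = list(DEFAULT_TIERS)
--         for f in overrides:
--             if f not in DEFAULT_TIERS:
--                 field_order.append(f)
--     else:
--         field_order = [field]
--
--     for f in field_order:
--         base = DEFAULT_TIERS.get(f, {})
--         extra = overrides.get(f, {})
--         tier_order = list(base)
--         for t in extra:
--             if t not in base: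
--                 tier_order.append(t)
--         for t in tier_order:
--             for v in base.get(t, []) + list(extra.get(t, [])):
--                 if v.lower() == venue_lower:
--                     return int(t.split("_")[1])
--     return None
-- ===== Notes on version B (the rewrite author's own statement) =====
-- stated objective: alternative
-- what changed: B drops _merge_tiers entirely: instead of deep-copying and merging the registry with the overrides and then scanning the merged structure, it scans DEFAULT_TIERS and the overrides dict directly (default tier list concatenated with the override list per tier, override-only tiers and fields appended in order), which yields the same first match without building any merged registry.
-- outside the precondition, e.g. on get_tier_for_venue('V', 'x', {'x': {'tier_1': ['V'], 'bad': ['V']}}): A returns 1, B returns 1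
import Mathlib
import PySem

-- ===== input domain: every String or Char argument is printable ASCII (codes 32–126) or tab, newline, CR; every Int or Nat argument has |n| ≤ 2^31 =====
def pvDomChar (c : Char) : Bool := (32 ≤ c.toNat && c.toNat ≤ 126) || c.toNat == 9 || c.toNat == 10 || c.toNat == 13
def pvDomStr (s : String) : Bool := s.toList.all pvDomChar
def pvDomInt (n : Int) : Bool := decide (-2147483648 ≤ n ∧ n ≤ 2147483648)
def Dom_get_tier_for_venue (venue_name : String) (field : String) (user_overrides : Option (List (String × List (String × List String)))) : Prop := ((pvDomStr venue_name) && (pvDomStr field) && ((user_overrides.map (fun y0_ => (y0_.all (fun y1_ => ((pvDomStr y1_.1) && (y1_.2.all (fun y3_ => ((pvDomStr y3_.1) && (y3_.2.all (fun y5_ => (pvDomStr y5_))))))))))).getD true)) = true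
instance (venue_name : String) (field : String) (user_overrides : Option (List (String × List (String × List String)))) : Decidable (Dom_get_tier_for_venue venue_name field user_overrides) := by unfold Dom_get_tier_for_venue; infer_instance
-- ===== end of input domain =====

-- B answers the lookup directly from DEFAULT_TIERS and the overrides dict (default tier
-- lists concatenated with the override lists, override-only tiers/fields appended), so it
-- never builds A's deep-copied merged registry; same result, different decomposition.

-- ===== PORT A =====

-- shared module constant DEFAULT_TIERS (nested dict literal)
def defaultTiers : PySem.Dict String (PySem.Dict String (List String)) :=
  PySem.Dict.ofList [
    ("ai_ml", PySem.Dict.ofList [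
      ("tier_1", ["NeurIPS", "ICML", "ICLR"]),
      ("tier_2", ["AAAI", "IJCAI", "AISTATS", "UAI", "CoLT"]),
      ("tier_3", ["ACML", "ECML-PKDD", "AutoML Conf"])]),
    ("cv", PySem.Dict.ofList [
      ("tier_1", ["CVPR", "ICCV"]),
      ("tier_2", ["ECCV", "ACM MM"]),
      ("tier_3", ["WACV", "BMVC", "ICIP", "ICPR"])]),
    ("nlp", PySem.Dict.ofList [
      ("tier_1", ["ACL"]),
      ("tier_2", ["EMNLP", "Findings of ACL/EMNLP"]),
      ("tier_3", ["NAACL", "COLING", "EACL", "AACL", "LREC"])]),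
    ("robotics", PySem.Dict.ofList [
      ("tier_1", ["RSS", "CoRL"]),
      ("tier_2", ["ICRA", "IROS"]),
      ("tier_3", ["Humanoids", "ISER", "RoboSoft"])]),
    ("data_mining", PySem.Dict.ofList [
      ("tier_1", ["KDD", "WWW", "SIGIR", "WSDM"]),
      ("tier_2", ["CIKM", "ICDM", "SDM", "ECIR"]),
      ("tier_3", ["PAKDD", "DASFAA", "WISE"])]),
    ("journals", PySem.Dict.ofList [
      ("tier_1", ["TPAMI", "IJCV", "JMLR", "TACL", "Nature MI"]),
      ("tier_2", ["TIP", "TNNLS", "PR", "TMM", "TKDE"]),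
      ("tier_3", ["Neurocomputing", "NCAA", "ESWA"])])]

-- the Python caller passes user_overrides as a dict; the assoc-list argument is read as
-- dict(pairs) would build it (overwrite keeps position), at both nesting levels
def overridesDict (l : List (String × List (String × List String))) :
    PySem.Dict String (PySem.Dict String (List String)) :=
  PySem.Dict.ofList (l.map (fun p => (p.1, PySem.Dict.ofList p.2)))

-- A's helper _merge_tiers
def merge_tiers (user_overrides : Option (List (String × List (String × List String)))) :
    PySem.Dict String (PySem.Dict String (List String)) :=
  let result := defaultTiers   -- deepcopy of the default registry
  match user_overrides with
  | none => result
  | some l =>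
    if l = [] then result       -- 'if not user_overrides' also catches the empty dict
    else
      ((overridesDict l).items).foldl (fun result fp =>
        let f := fp.1
        let result := if result.contains f then result else result.insert f PySem.Dict.empty
        (fp.2.items).foldl (fun result tp =>
          let cur := result.getD f PySem.Dict.empty
          if cur.contains tp.1 then
            -- existing = {v.lower() for v in result[field][tier_name]} (fixed before the loop)
            let existing := PySem.Set.ofList ((cur.getD tp.1 []).map PySem.Str.lower)
            result.insert f (cur.insert tp.1
              (tp.2.foldl (fun acc v =>
                if !existing.contains (PySem.Str.lower v) then acc ++ [v] else acc)
                (cur.getD tp.1 [])))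
          else
            result.insert f (cur.insert tp.1 tp.2)) result) result

-- int(tier_name.split("_")[1]) — none exactly where Python raises (excluded by Pre_)
def parseTier (t : String) : Option Int :=
  (PySem.List.pyGet? ((PySem.Str.split? t "_").getD []) 1).bind PySem.Int.ofStr?

-- inner two loops of A: first (tier_name, venues) whose venues contain the venue;
-- the matched tier name is returned and int() applied at A's return site (same value)
def scanTiers (venue_lower : String) : List (String × List String) → Option String
  | [] => none
  | (t, vs) :: rest =>
    if vs.any (fun v => PySem.Str.lower v == venue_lower) then some t
    else scanTiers venue_lower rest

-- outer loop of A over fields_to_search, with A's early return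
def scanFields (tiers : PySem.Dict String (PySem.Dict String (List String)))
    (venue_lower : String) : List String → Option String
  | [] => none
  | f :: rest =>
    match scanTiers venue_lower ((tiers.getD f PySem.Dict.empty).items) with
    | some t => some t
    | none => scanFields tiers venue_lower rest

def get_tier_for_venue (venue_name : String) (field : String) (user_overrides : Option (List (String × List (String × List String)))) : Option Int :=
  let tiers := merge_tiers user_overrides
  let venue_lower := PySem.Str.strip (PySem.Str.lower venue_name)
  let fields_to_search := if field == "auto" then tiers.keys else [field]
  match scanFields tiers venue_lower fields_to_search with
  | some t => parseTier t
  | none => none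

-- ===== PORT B =====

-- tier_order = list(base) + [t for t in extra if t not in base]
def bTierOrder (base extra : PySem.Dict String (List String)) : List String :=
  extra.keys.foldl (fun acc t => if !base.contains t then acc ++ [t] else acc) base.keys

-- inner loop of B: first tier (in tier_order) whose default + override venues match;
-- the matched tier name is returned and int() applied at B's return site (same value)
def bFindTier (venue_lower : String) (base extra : PySem.Dict String (List String)) :
    List String → Option String
  | [] => none
  | t :: rest =>
    if (base.getD t [] ++ extra.getD t []).any (fun v => PySem.Str.lower v == venue_lower)
    then some t
    else bFindTier venue_lower base extra rest

-- outer loop of B over field_order, with B's early return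
def bFindField (ovd : PySem.Dict String (PySem.Dict String (List String)))
    (venue_lower : String) : List String → Option String
  | [] => none
  | f :: rest =>
    let base := defaultTiers.getD f PySem.Dict.empty
    let extra := ovd.getD f PySem.Dict.empty
    match bFindTier venue_lower base extra (bTierOrder base extra) with
    | some t => some t
    | none => bFindField ovd venue_lower rest

def get_tier_for_venue_alt (venue_name : String) (field : String) (user_overrides : Option (List (String × List (String × List String)))) : Option Int :=
  let venue_lower := PySem.Str.strip (PySem.Str.lower venue_name)
  let ovd := overridesDict (user_overrides.getD [])   -- 'user_overrides or {}'
  -- field_order = list(DEFAULT_TIERS) + [f for f in overrides if f not in DEFAULT_TIERS]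
  let field_order :=
    if field == "auto" then
      ovd.keys.foldl (fun acc f => if !defaultTiers.contains f then acc ++ [f] else acc)
        defaultTiers.keys
    else [field]
  match bFindField ovd venue_lower field_order with
  | some t => parseTier t
  | none => none

-- ===== PRECONDITION & SPEC =====
-- Pre_ excludes inputs on which Python A raises (ValueError/IndexError from
-- int(tier_name.split("_")[1]) when a user-override tier whose name is not of the
-- int-parseable form "…_<int>" contains the searched venue); B raises identically there.
-- It is stated over all searched override tiers containing the venue, so it also excludes
-- a few inputs where A returns from an earlier tier before reaching the bad one.
def Pre_get_tier_for_venue (venue_name : String) (field : String) (user_overrides : Option (List (String × List (String × List String)))) : Prop :=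
  ∀ p ∈ user_overrides.getD [], (field = "auto" ∨ p.1 = field) →
    ∀ tp ∈ p.2,
      (∃ v ∈ tp.2, PySem.Str.lower v = PySem.Str.strip (PySem.Str.lower venue_name)) →
      (parseTier tp.1).isSome = true
instance (venue_name : String) (field : String) (user_overrides : Option (List (String × List (String × List String)))) : Decidable (Pre_get_tier_for_venue venue_name field user_overrides) := by unfold Pre_get_tier_for_venue; infer_instance

def pvWitness_get_tier_for_venue : String × String × (Option (List (String × List (String × List String)))) :=
  ("NeurIPS", "auto", some [("ai_ml", [("tier_2", ["MyConf"])])])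

def Spec_get_tier_for_venue (venue_name : String) (field : String) (user_overrides : Option (List (String × List (String × List String)))) (out : Option Int) : Prop := out = get_tier_for_venue_alt venue_name field user_overrides
instance (venue_name : String) (field : String) (user_overrides : Option (List (String × List (String × List String)))) (out : Option Int) : Decidable (Spec_get_tier_for_venue venue_name field user_overrides out) := by unfold Spec_get_tier_for_venue; infer_instance

-- ===== CLAIM (what is proved, stated in full; the proofs are below) =====
def Claim_equal_get_tier_for_venue : Prop := ∀ (venue_name : String) (field : String) (user_overrides : Option (List (String × List (String × List String)))), Dom_get_tier_for_venue venue_name field user_overrides → Pre_get_tier_for_venue venue_name field user_overrides → Spec_get_tier_for_venue venue_name field user_overrides (get_tier_for_venue venue_name field user_overrides)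

-- ===== LEMMAS AND PROOFS =====

-- canonical value written by one step of A's inner (per-tier) merge loop
def tierVal (o : Option (List String)) (tp : String × List String) : List String :=
  match o with
  | some cur => cur ++ tp.2.filter
      (fun v => !(PySem.Set.ofList (cur.map PySem.Str.lower)).contains (PySem.Str.lower v))
  | none => tp.2

-- A's per-field merge, rebased onto the field's own tier dict
def mergeField (base : PySem.Dict String (List String)) (tps : List (String × List String)) :
    PySem.Dict String (List String) :=
  tps.foldl (fun cur tp => cur.insert tp.1 (tierVal (cur.get? tp.1) tp)) base

-- generic: a fold of inserts keyed by the pairs' first components, looked up at a key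
-- not among them, leaves that key's binding unchanged
theorem foldl_insert_get?_not_mem {α ν : Type}
    (step : PySem.Dict String ν → String × α → PySem.Dict String ν)
    (V : PySem.Dict String ν → String × α → ν)
    (hstep : ∀ r p, step r p = r.insert p.1 (V r p))
    (l : List (String × α)) (r : PySem.Dict String ν) (k : String)
    (h : k ∉ l.map Prod.fst) :
    (l.foldl step r).get? k = r.get? k := by
  induction l generalizing r with
  | nil => rfl
  | cons p rest ih =>
    simp only [List.map_cons, List.mem_cons, not_or] at h
    simp only [List.foldl_cons, ih _ h.2, hstep, PySem.Dict.get?_insert_of_ne _ _ h.1]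

-- generic: such a fold over pairs with distinct keys, looked up at any key
theorem foldl_insert_get?_nodup {α ν : Type}
    (step : PySem.Dict String ν → String × α → PySem.Dict String ν)
    (V : Option ν → String × α → ν)
    (hstep : ∀ r p, step r p = r.insert p.1 (V (r.get? p.1) p))
    (l : List (String × α)) (r : PySem.Dict String ν) (k : String)
    (h : (l.map Prod.fst).Nodup) :
    (l.foldl step r).get? k =
      match l.find? (fun p => p.1 == k) with
      | some p => some (V (r.get? k) p)
      | none => r.get? k := by
  induction l generalizing r with
  | nil => rfl
  | cons p rest ih =>
    simp only [List.map_cons, List.nodup_cons] at h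
    by_cases hk : k = p.1
    · subst hk
      simp only [List.foldl_cons, List.find?_cons, BEq.rfl]
      rw [foldl_insert_get?_not_mem step (fun r q => V (r.get? q.1) q) hstep rest _ p.1 h.1,
        hstep, PySem.Dict.get?_insert_self]
    · have hb : (p.1 == k) = false := by simpa using fun h' => hk h'.symm
      simp only [List.foldl_cons, List.find?_cons, hb]
      rw [ih _ h.2, hstep, PySem.Dict.get?_insert_of_ne _ _ hk]

-- generic: keys after such a fold (distinct new keys appended in first-appearance order)
theorem foldl_insert_keys_nodup {α ν : Type}
    (step : PySem.Dict String ν → String × α → PySem.Dict String ν)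
    (V : PySem.Dict String ν → String × α → ν)
    (hstep : ∀ r p, step r p = r.insert p.1 (V r p))
    (l : List (String × α)) (r : PySem.Dict String ν)
    (h : (l.map Prod.fst).Nodup) :
    (l.foldl step r).keys =
      r.keys ++ (l.map Prod.fst).filter (fun k => !r.contains k) := by
  induction l generalizing r with
  | nil => simp
  | cons p rest ih =>
    simp only [List.map_cons, List.nodup_cons] at h
    simp only [List.foldl_cons, List.map_cons, List.filter_cons]
    rw [hstep, ih _ h.2]
    have hcong : (rest.map Prod.fst).filter (fun k => !(r.insert p.1 (V r p)).contains k) =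
        (rest.map Prod.fst).filter (fun k => !r.contains k) := by
      apply List.filter_congr
      intro x hx
      have hne : (x == p.1) = false := by
        simp only [beq_eq_false_iff_ne, ne_eq]
        intro h'; exact h.1 (h' ▸ hx)
      rw [PySem.Dict.contains_insert, hne, Bool.false_or]
    rw [hcong]
    by_cases hc : r.contains p.1 = true
    · rw [PySem.Dict.keys_insert_of_contains _ _ hc, hc]
      simp
    · have hc' : r.contains p.1 = false := by simpa using hc
      rw [PySem.Dict.keys_insert_of_not_contains _ _ hc', hc']
      simp

-- an insert that rewrites a present key with its own value is the identity
theorem insert_getD_self {ν : Type} (d : PySem.Dict String ν) (k : String) (d0 : ν)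
    (hnd : d.keys.Nodup) (hc : d.contains k = true) :
    d.insert k (d.getD k d0) = d := by
  apply PySem.Dict.ext
  rw [PySem.Dict.items_insert_of_contains _ _ hc]
  have h : ∀ p ∈ d.items,
      (if (p.1 == k) = true then (k, d.getD k d0) else p) = id p := by
    intro p hp
    by_cases hpk : p.1 = k
    · subst hpk
      have hkv : (p.1, p.2) ∈ d.items := by simpa using hp
      have hv : d.getD p.1 d0 = p.2 := PySem.Dict.getD_of_mem_items _ hkv hnd d0
      simp [hv]
    · simp [hpk]
  rw [List.map_congr_left h, List.map_id]

-- A's inner fold at field f equals a single insert of the rebased per-field merge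
theorem inner_fold_eq (f : String) (tps : List (String × List String))
    (r : PySem.Dict String (PySem.Dict String (List String)))
    (hnd : r.keys.Nodup) (hf : r.contains f = true) :
    tps.foldl (fun result tp =>
      let cur := result.getD f PySem.Dict.empty
      if cur.contains tp.1 then
        let existing := PySem.Set.ofList ((cur.getD tp.1 []).map PySem.Str.lower)
        result.insert f (cur.insert tp.1
          (tp.2.foldl (fun acc v =>
            if !existing.contains (PySem.Str.lower v) then acc ++ [v] else acc)
            (cur.getD tp.1 [])))
      else
        result.insert f (cur.insert tp.1 tp.2)) r
    = r.insert f (mergeField (r.getD f PySem.Dict.empty) tps) := by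
  induction tps generalizing r with
  | nil =>
    simp only [List.foldl_nil, mergeField]
    exact (insert_getD_self r f PySem.Dict.empty hnd hf).symm
  | cons tp rest ih =>
    simp only [List.foldl_cons]
    have hstep : (let cur := r.getD f PySem.Dict.empty;
        if cur.contains tp.1 then
          let existing := PySem.Set.ofList ((cur.getD tp.1 []).map PySem.Str.lower)
          r.insert f (cur.insert tp.1
            (tp.2.foldl (fun acc v =>
              if !existing.contains (PySem.Str.lower v) then acc ++ [v] else acc)
              (cur.getD tp.1 [])))
        else r.insert f (cur.insert tp.1 tp.2))
        = r.insert f ((r.getD f PySem.Dict.empty).insert tp.1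
            (tierVal ((r.getD f PySem.Dict.empty).get? tp.1) tp)) := by
      cases hg : (r.getD f PySem.Dict.empty).get? tp.1 with
      | none =>
        have hc : (r.getD f PySem.Dict.empty).contains tp.1 = false := by
          rw [PySem.Dict.contains_eq_isSome_get?, hg]; rfl
        simp only [hc, Bool.false_eq_true, if_false, tierVal]
      | some c =>
        have hc : (r.getD f PySem.Dict.empty).contains tp.1 = true := by
          rw [PySem.Dict.contains_eq_isSome_get?, hg]; rfl
        have hgd : (r.getD f PySem.Dict.empty).getD tp.1 [] = c := by
          rw [PySem.Dict.getD_eq_get?_getD, hg]; rfl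
        simp only [hc, if_true, hgd, tierVal,
          PySem.List.foldl_append_if_eq_filter
            (fun v => !(PySem.Set.ofList (c.map PySem.Str.lower)).contains (PySem.Str.lower v))]
    rw [hstep, ih]
    · rw [PySem.Dict.getD_insert_self, PySem.Dict.insert_insert_self]
      rfl
    · exact PySem.Dict.nodup_keys_insert _ _ _ hnd
    · rw [PySem.Dict.contains_insert]
      simp

-- A's whole merge as one canonical fold over the overrides items
theorem outer_fold_eq (L : List (String × PySem.Dict String (List String)))
    (r : PySem.Dict String (PySem.Dict String (List String))) (hnd : r.keys.Nodup) :
    L.foldl (fun result fp =>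
      let f := fp.1
      let result := if result.contains f then result else result.insert f PySem.Dict.empty
      (fp.2.items).foldl (fun result tp =>
        let cur := result.getD f PySem.Dict.empty
        if cur.contains tp.1 then
          let existing := PySem.Set.ofList ((cur.getD tp.1 []).map PySem.Str.lower)
          result.insert f (cur.insert tp.1
            (tp.2.foldl (fun acc v =>
              if !existing.contains (PySem.Str.lower v) then acc ++ [v] else acc)
              (cur.getD tp.1 [])))
        else
          result.insert f (cur.insert tp.1 tp.2)) result) r
    = L.foldl (fun r fp =>
        r.insert fp.1 (mergeField ((r.get? fp.1).getD PySem.Dict.empty) fp.2.items)) r := by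
  induction L generalizing r with
  | nil => rfl
  | cons fp rest ih =>
    simp only [List.foldl_cons]
    have hstep : (let f := fp.1
        let r' := if r.contains f then r else r.insert f PySem.Dict.empty
        (fp.2.items).foldl (fun result tp =>
          let cur := result.getD f PySem.Dict.empty
          if cur.contains tp.1 then
            let existing := PySem.Set.ofList ((cur.getD tp.1 []).map PySem.Str.lower)
            result.insert f (cur.insert tp.1
              (tp.2.foldl (fun acc v =>
                if !existing.contains (PySem.Str.lower v) then acc ++ [v] else acc)
                (cur.getD tp.1 [])))
          else
            result.insert f (cur.insert tp.1 tp.2)) r')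
        = r.insert fp.1 (mergeField ((r.get? fp.1).getD PySem.Dict.empty) fp.2.items) := by
      by_cases hc : r.contains fp.1 = true
      · simp only [hc, if_true]
        rw [inner_fold_eq fp.1 fp.2.items r hnd hc]
        rfl
      · have hc' : r.contains fp.1 = false := by simpa using hc
        simp only [hc, Bool.false_eq_true, if_false]
        rw [inner_fold_eq fp.1 fp.2.items (r.insert fp.1 PySem.Dict.empty)
          (PySem.Dict.nodup_keys_insert _ _ _ hnd)
          (by rw [PySem.Dict.contains_insert]; simp)]
        rw [PySem.Dict.getD_insert_self, PySem.Dict.insert_insert_self]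
        have : r.get? fp.1 = none := by
          rw [PySem.Dict.get?_eq_none_iff_contains]; simpa using hc'
        rw [this]
        rfl
    rw [hstep, ih _ (PySem.Dict.nodup_keys_insert _ _ _ hnd)]

theorem defaultTiers_nodup : defaultTiers.keys.Nodup := by decide

theorem merge_tiers_eq (uo : Option (List (String × List (String × List String)))) :
    merge_tiers uo =
      ((overridesDict (uo.getD [])).items).foldl
        (fun r fp => r.insert fp.1 (mergeField ((r.get? fp.1).getD PySem.Dict.empty) fp.2.items))
        defaultTiers := by
  cases uo with
  | none => rfl
  | some l =>
    by_cases hl : l = []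
    · subst hl; rfl
    · show merge_tiers (some l) = _
      unfold merge_tiers
      simp only [hl, if_false]
      exact outer_fold_eq _ defaultTiers defaultTiers_nodup

-- ---- flattened entry lists ((lowered venue, tier name) pairs, in scan order) ----

def tentries (d : PySem.Dict String (List String)) : List (String × String) :=
  d.items.flatMap (fun tp => tp.2.map (fun v => (PySem.Str.lower v, tp.1)))

def fentriesA (tiers : PySem.Dict String (PySem.Dict String (List String)))
    (fs : List String) : List (String × String) :=
  fs.flatMap (fun f => tentries (tiers.getD f PySem.Dict.empty))

def bentries (base extra : PySem.Dict String (List String)) : List (String × String) :=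
  (bTierOrder base extra).flatMap
    (fun t => (base.getD t [] ++ extra.getD t []).map (fun v => (PySem.Str.lower v, t)))

def fentriesB (ovd : PySem.Dict String (PySem.Dict String (List String)))
    (fs : List String) : List (String × String) :=
  fs.flatMap (fun f =>
    bentries (defaultTiers.getD f PySem.Dict.empty) (ovd.getD f PySem.Dict.empty))

-- A's inner two loops find the tier name of the first matching flattened entry
theorem scanTiers_eq_find (venue_lower : String) (tps : List (String × List String)) :
    scanTiers venue_lower tps =
      ((tps.flatMap (fun tp => tp.2.map (fun v => (PySem.Str.lower v, tp.1)))).find?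
        (fun e => e.1 == venue_lower)).map Prod.snd := by
  induction tps with
  | nil => simp [scanTiers]
  | cons tp rest ih =>
    obtain ⟨t, vs⟩ := tp
    simp only [scanTiers, List.flatMap_cons, List.find?_append, List.find?_map]
    cases hf : vs.find? ((fun (e : String × String) => e.1 == venue_lower) ∘
        (fun v => (PySem.Str.lower v, t))) with
    | some v =>
      have : vs.any (fun v => PySem.Str.lower v == venue_lower) = true := by
        rcases List.find?_some hf, List.mem_of_find?_eq_some hf with ⟨hp, hm⟩
        exact List.any_eq_true.mpr ⟨v, hm, hp⟩
      simp [this]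
    | none =>
      have : vs.any (fun v => PySem.Str.lower v == venue_lower) = false := by
        rw [Bool.eq_false_iff]
        intro hany
        rcases List.any_eq_true.mp hany with ⟨v, hm, hp⟩
        exact absurd (List.find?_eq_none.mp hf v hm) (by simpa using hp)
      simp [this, ih]

-- A's outer loop finds the tier name of the first matching entry over all fields
theorem scanFields_eq_find (tiers : PySem.Dict String (PySem.Dict String (List String)))
    (venue_lower : String) (fs : List String) :
    scanFields tiers venue_lower fs =
      ((fentriesA tiers fs).find? (fun e => e.1 == venue_lower)).map Prod.snd := by
  induction fs with
  | nil => simp [scanFields, fentriesA]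
  | cons f rest ih =>
    simp only [scanFields, fentriesA, List.flatMap_cons, List.find?_append, Option.map_or,
      scanTiers_eq_find, tentries]
    cases ((((tiers.getD f PySem.Dict.empty).items).flatMap
        (fun tp => tp.2.map (fun v => (PySem.Str.lower v, tp.1)))).find?
        (fun e => e.1 == venue_lower)).map Prod.snd with
    | some t => simp
    | none => simpa [fentriesA, tentries] using ih

-- B's inner loop finds the tier name of the first matching flattened entry
theorem bFindTier_eq_find (venue_lower : String) (base extra : PySem.Dict String (List String))
    (ts : List String) :
    bFindTier venue_lower base extra ts =
      ((ts.flatMap (fun t =>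
          (base.getD t [] ++ extra.getD t []).map (fun v => (PySem.Str.lower v, t)))).find?
        (fun e => e.1 == venue_lower)).map Prod.snd := by
  induction ts with
  | nil => simp [bFindTier]
  | cons t rest ih =>
    simp only [bFindTier, List.flatMap_cons, List.find?_append]
    have hmk : ((fun (e : String × String) => e.1 == venue_lower) ∘
        (fun v => (PySem.Str.lower v, t))) = (fun v => PySem.Str.lower v == venue_lower) := rfl
    cases hf : (base.getD t [] ++ extra.getD t []).find?
        (fun v => PySem.Str.lower v == venue_lower) with
    | some v =>
      have hany : (base.getD t [] ++ extra.getD t []).any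
          (fun v => PySem.Str.lower v == venue_lower) = true := by
        rw [List.any_eq_true]
        have hpv := List.find?_some hf
        exact ⟨v, List.mem_of_find?_eq_some hf, by simpa using hpv⟩
      rw [hany, if_pos rfl, List.find?_map, hmk, hf]
      rfl
    | none =>
      have hany : (base.getD t [] ++ extra.getD t []).any
          (fun v => PySem.Str.lower v == venue_lower) = false := by
        rw [Bool.eq_false_iff]
        intro h
        rcases List.any_eq_true.mp h with ⟨v, hm, hp⟩
        exact absurd (List.find?_eq_none.mp hf v hm) (by simpa using hp)
      rw [hany, if_neg (by simp), List.find?_map, hmk, hf]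
      simpa using ih

-- B's outer loop finds the tier name of the first matching entry over all fields
theorem bFindField_eq_find (ovd : PySem.Dict String (PySem.Dict String (List String)))
    (venue_lower : String) (fs : List String) :
    bFindField ovd venue_lower fs =
      ((fentriesB ovd fs).find? (fun e => e.1 == venue_lower)).map Prod.snd := by
  induction fs with
  | nil => simp [bFindField, fentriesB]
  | cons f rest ih =>
    simp only [bFindField, fentriesB, List.flatMap_cons, List.find?_append, Option.map_or,
      bFindTier_eq_find, bentries]
    cases (((bTierOrder (defaultTiers.getD f PySem.Dict.empty) (ovd.getD f PySem.Dict.empty)).flatMap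
        (fun t => ((defaultTiers.getD f PySem.Dict.empty).getD t [] ++
                   (ovd.getD f PySem.Dict.empty).getD t []).map
          (fun v => (PySem.Str.lower v, t)))).find?
        (fun e => e.1 == venue_lower)).map Prod.snd with
    | some t => simp
    | none => simpa [fentriesB, bentries] using ih

-- ---- structural facts ----

theorem find?_flatMap_congr {α β : Type} (p : β → Bool) (l : List α) (f g : α → List β)
    (h : ∀ x ∈ l, (f x).find? p = (g x).find? p) :
    (l.flatMap f).find? p = (l.flatMap g).find? p := by
  induction l with
  | nil => rfl
  | cons x rest ih =>
    simp only [List.flatMap_cons, List.find?_append,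
      h x (List.mem_cons_self), ih (fun y hy => h y (List.mem_cons_of_mem _ hy))]

theorem find?_filter_of_fail {α : Type} (p q : α → Bool) (l : List α)
    (h : ∀ v ∈ l, q v = false → p v = false) :
    (l.filter q).find? p = l.find? p := by
  induction l with
  | nil => rfl
  | cons v rest ih =>
    simp only [List.filter_cons]
    by_cases hq : q v = true
    · simp only [hq, if_true, List.find?_cons]
      cases hp : p v <;>
        simp [ih (fun w hw => h w (List.mem_cons_of_mem _ hw))]
    · have hq' : q v = false := by simpa using hq
      have hp : p v = false := h v List.mem_cons_self hq'
      simp [hq', hp, ih (fun w hw => h w (List.mem_cons_of_mem _ hw))]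

-- a getD value is the default or one of the dict's values
theorem getD_mem_values {ν : Type} (d : PySem.Dict String ν) (k : String) (dflt : ν) :
    d.getD k dflt = dflt ∨ d.getD k dflt ∈ d.values := by
  cases h : d.get? k with
  | none => left; rw [PySem.Dict.getD_eq_get?_getD, h]; rfl
  | some v =>
    right
    rw [PySem.Dict.getD_eq_get?_getD, h]
    have hv : (d.items.find? (fun p => p.1 == k)).map Prod.snd = some v := h
    rcases Option.map_eq_some_iff.mp hv with ⟨pr, hfind, hsnd⟩
    have hm := List.mem_of_find?_eq_some hfind
    rw [← hsnd]
    exact List.mem_map_of_mem (f := fun x => x.2) hm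

theorem values_foldl_insert_sub {ν : Type} (L : List (String × ν))
    (d : PySem.Dict String ν) (w : ν)
    (h : w ∈ (L.foldl (fun acc p => acc.insert p.1 p.2) d).values) :
    w ∈ L.map Prod.snd ∨ w ∈ d.values := by
  induction L generalizing d with
  | nil => right; simpa using h
  | cons p rest ih =>
    simp only [List.foldl_cons] at h
    rcases ih _ h with hr | hd
    · left; exact List.mem_cons_of_mem _ hr
    · rcases PySem.Dict.mem_values_insert _ _ _ _ hd with he | hd'
      · left; simp [he]
      · right; exact hd'

theorem default_field_nodup (f : String) :
    (defaultTiers.getD f PySem.Dict.empty).keys.Nodup := by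
  rcases getD_mem_values defaultTiers f PySem.Dict.empty with h | h
  · rw [h]; exact List.nodup_nil
  · revert h
    generalize defaultTiers.getD f PySem.Dict.empty = d
    intro h
    have : ∀ w ∈ defaultTiers.values, w.keys.Nodup := by decide
    exact this d h

theorem override_field_nodup (l : List (String × List (String × List String))) (f : String) :
    ((overridesDict l).getD f PySem.Dict.empty).keys.Nodup := by
  rcases getD_mem_values (overridesDict l) f PySem.Dict.empty with h | h
  · rw [h]; exact List.nodup_nil
  · rcases values_foldl_insert_sub _ _ _ h with hm | hm
    · rcases List.mem_map.mp hm with ⟨p, hp, hw⟩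
      rcases List.mem_map.mp hp with ⟨q, _, hq⟩
      rw [← hw, ← hq]
      exact PySem.Dict.nodup_keys_ofList _
    · simp [PySem.Dict.values, PySem.Dict.empty] at hm

-- ---- the merged registry, observed field by field ----

theorem merged_keys (uo : Option (List (String × List (String × List String)))) :
    (merge_tiers uo).keys =
      defaultTiers.keys ++
        ((overridesDict (uo.getD [])).keys).filter (fun f => !defaultTiers.contains f) := by
  rw [merge_tiers_eq]
  exact foldl_insert_keys_nodup _
    (fun r (fp : String × PySem.Dict String (List String)) =>
      mergeField ((r.get? fp.1).getD PySem.Dict.empty) fp.2.items)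
    (fun _ _ => rfl) ((overridesDict (uo.getD [])).items) defaultTiers
    (by exact PySem.Dict.nodup_keys_ofList _)

theorem merged_getD (uo : Option (List (String × List (String × List String)))) (f : String) :
    (merge_tiers uo).getD f PySem.Dict.empty =
      mergeField (defaultTiers.getD f PySem.Dict.empty)
        ((overridesDict (uo.getD [])).getD f PySem.Dict.empty).items := by
  rw [merge_tiers_eq, PySem.Dict.getD_eq_get?_getD]
  rw [foldl_insert_get?_nodup
    (fun r (fp : String × PySem.Dict String (List String)) =>
      r.insert fp.1 (mergeField ((r.get? fp.1).getD PySem.Dict.empty) fp.2.items))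
    (fun o (fp : String × PySem.Dict String (List String)) =>
      mergeField (o.getD PySem.Dict.empty) fp.2.items)
    (fun _ _ => rfl) ((overridesDict (uo.getD [])).items) defaultTiers f
    (by exact PySem.Dict.nodup_keys_ofList _)]
  cases hfind : ((overridesDict (uo.getD [])).items).find? (fun p => p.1 == f) with
  | none =>
    have hg : (overridesDict (uo.getD [])).get? f = none := by
      show ((overridesDict (uo.getD [])).items.find? (fun p => p.1 == f)).map Prod.snd = none
      rw [hfind]; rfl
    have hx : (overridesDict (uo.getD [])).getD f PySem.Dict.empty = PySem.Dict.empty := by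
      rw [PySem.Dict.getD_eq_get?_getD, hg]; rfl
    rw [hx, PySem.Dict.getD_eq_get?_getD]
    rfl
  | some fp =>
    have hg : (overridesDict (uo.getD [])).get? f = some fp.2 := by
      show ((overridesDict (uo.getD [])).items.find? (fun p => p.1 == f)).map Prod.snd = _
      rw [hfind]; rfl
    have hx : (overridesDict (uo.getD [])).getD f PySem.Dict.empty = fp.2 := by
      rw [PySem.Dict.getD_eq_get?_getD, hg]; rfl
    rw [hx, PySem.Dict.getD_eq_get?_getD]
    rfl

theorem mergeField_keys (base extra : PySem.Dict String (List String)) :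
    extra.keys.Nodup →
    (mergeField base extra.items).keys =
      base.keys ++ extra.keys.filter (fun t => !base.contains t) := by
  intro h
  exact foldl_insert_keys_nodup _
    (fun cur (tp : String × List String) => tierVal (cur.get? tp.1) tp)
    (fun _ _ => rfl) _ _ h

theorem mergeField_nodup (base extra : PySem.Dict String (List String))
    (hb : base.keys.Nodup) :
    (mergeField base extra.items).keys.Nodup :=
  PySem.Dict.nodup_keys_foldl_insert_key _ Prod.fst
    (fun cur tp => tierVal (cur.get? tp.1) tp) _ hb

theorem bTierOrder_eq (base extra : PySem.Dict String (List String)) :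
    bTierOrder base extra = base.keys ++ extra.keys.filter (fun t => !base.contains t) :=
  PySem.List.foldl_append_if_eq_filter (fun t => !base.contains t) _ _

-- first match in a merged tier list = first match in default ++ override lists
theorem tier_block (base extra : PySem.Dict String (List String)) (key t : String)
    (hen : extra.keys.Nodup) :
    (((mergeField base extra.items).getD t []).map
        (fun v => (PySem.Str.lower v, t))).find? (fun e => e.1 == key) =
    ((base.getD t [] ++ extra.getD t []).map
        (fun v => (PySem.Str.lower v, t))).find? (fun e => e.1 == key) := by
  unfold mergeField
  have hget := foldl_insert_get?_nodup
    (fun cur (tp : String × List String) => cur.insert tp.1 (tierVal (cur.get? tp.1) tp))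
    tierVal (fun _ _ => rfl) extra.items base t hen
  cases hfind : (extra.items).find? (fun p => p.1 == t) with
  | none =>
    have hx : extra.get? t = none := by
      show (extra.items.find? (fun p => p.1 == t)).map Prod.snd = none
      rw [hfind]; rfl
    rw [hfind] at hget
    rw [PySem.Dict.getD_eq_get?_getD, PySem.Dict.getD_eq_get?_getD extra, hget, hx]
    simp [PySem.Dict.getD_eq_get?_getD]
  | some tp =>
    have ht : tp.1 = t := by simpa using List.find?_some hfind
    have hx : extra.get? t = some tp.2 := by
      show (extra.items.find? (fun p => p.1 == t)).map Prod.snd = _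
      rw [hfind]; rfl
    rw [hfind] at hget
    rw [PySem.Dict.getD_eq_get?_getD, PySem.Dict.getD_eq_get?_getD extra, hget, hx]
    cases hb : base.get? t with
    | none =>
      rw [PySem.Dict.getD_eq_get?_getD, hb]
      simp [tierVal]
    | some c =>
      rw [PySem.Dict.getD_eq_get?_getD, hb]
      simp only [tierVal, Option.getD_some, List.map_append, List.find?_append]
      cases hc : (c.map (fun v => (PySem.Str.lower v, t))).find? (fun e => e.1 == key) with
      | some e => simp only [Option.some_or]
      | none =>
        simp only [Option.none_or]
        rw [List.find?_map, List.find?_map]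
        rw [find?_filter_of_fail]
        intro v _ hqv
        have hcont : (PySem.Set.ofList (c.map PySem.Str.lower)).contains
            (PySem.Str.lower v) = true := by
          revert hqv; cases (PySem.Set.ofList (c.map PySem.Str.lower)).contains
            (PySem.Str.lower v) <;> simp
        have hmem : PySem.Str.lower v ∈ c.map PySem.Str.lower := by
          have := (PySem.Set.mem_ofList (c.map PySem.Str.lower) (PySem.Str.lower v)).mp
            (by simpa [PySem.Set.contains, List.contains_iff_exists_mem_beq] using
              (List.contains_iff_mem.mp hcont))
          exact this
        rcases List.mem_map.mp hmem with ⟨u, hu, huv⟩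
        have := List.find?_eq_none.mp hc _ (List.mem_map_of_mem hu)
        simpa [← huv] using this

-- per-field: first match in the merged registry's field = first match in B's direct scan
theorem field_block (uo : Option (List (String × List (String × List String))))
    (f key : String) :
    (tentries ((merge_tiers uo).getD f PySem.Dict.empty)).find? (fun e => e.1 == key) =
    (bentries (defaultTiers.getD f PySem.Dict.empty)
      ((overridesDict (uo.getD [])).getD f PySem.Dict.empty)).find? (fun e => e.1 == key) := by
  have hb := default_field_nodup f
  have he := override_field_nodup (uo.getD []) f
  rw [merged_getD]
  have hnd := mergeField_nodup (defaultTiers.getD f PySem.Dict.empty)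
    ((overridesDict (uo.getD [])).getD f PySem.Dict.empty) hb
  have hitems := PySem.Dict.items_eq_map_keys _ hnd ([] : List String)
  unfold tentries bentries
  rw [hitems, List.flatMap_map, bTierOrder_eq, ← mergeField_keys _ _ he]
  apply find?_flatMap_congr
  intro t _
  exact tier_block _ _ key t he

-- ===== VERDICT (by name: the statement is the Claim_ definition above) =====
theorem get_tier_for_venue_spec : Claim_equal_get_tier_for_venue := by
  intro venue_name field uo _ _
  unfold Spec_get_tier_for_venue
  unfold get_tier_for_venue get_tier_for_venue_alt
  simp only []
  rw [scanFields_eq_find, bFindField_eq_find]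
  have hfields : (if field == "auto" then (merge_tiers uo).keys else [field]) =
      (if field == "auto" then
        ((overridesDict (uo.getD [])).keys).foldl
          (fun acc f => if !defaultTiers.contains f then acc ++ [f] else acc)
          defaultTiers.keys
       else [field]) := by
    by_cases hf : (field == "auto") = true
    · simp only [hf, if_true, merged_keys,
        PySem.List.foldl_append_if_eq_filter (fun f => !defaultTiers.contains f)]
    · simp [hf]
  rw [hfields]
  have hfind : ∀ fs : List String,
      (fentriesA (merge_tiers uo) fs).find? (fun e => e.1 ==
          PySem.Str.strip (PySem.Str.lower venue_name)) =
      (fentriesB (overridesDict (uo.getD [])) fs).find? (fun e => e.1 ==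
          PySem.Str.strip (PySem.Str.lower venue_name)) := by
    intro fs
    apply find?_flatMap_congr
    intro f _
    exact field_block uo f _
  rw [hfind]
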